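-- pv_equiv track=rewrite | github.com/DanielSank/foobar | codes.py | answer
-- ===== SOURCE A (Python) =====
-- def answer(codes):
--     """Find number of distinct access codes in a list of possibilities.
--
--     Two codes are equivalent if they are the same or reverses of one
--     another. Two codes which are not equivalent are distinct. For
--     example, 'abc' is equivalent to 'abc' and 'cba', but not to 'bca'.
--
--     The empty string counts as a code.
--
--     Args:
--         codes (list(str)): List of possible access codes. Each code is
--             a string containing only letters a-z, all lower case.
--             Lenth of this list is never longer than 5000 codes. Each
--             code has at most 10 characters.
--
--     Returns (int): number of distinct codes.
--     """
--     s = set()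
--     num_distinct_codes = 0
--     for code in codes:
--         if code in s:
--             continue
--         elif is_palindrome(code):
--             s.add(code)
--         else:
--             s.add(code)
--             s.add(code[::-1])
--         num_distinct_codes += 1
--     return num_distinct_codes
--
-- def is_palindrome(code):
--     if code == code[::-1]:
--         return True
--     else:
--         return False
-- ===== SOURCE B (Python) =====
-- def answer(codes):
--     """Count distinct codes up to reversal, via canonical representatives."""
--     return len({min(code, code[::-1]) for code in codes})
-- ===== Notes on version B (the rewrite author's own statement) =====
-- stated objective: simpler
-- what changed: B replaces the palindrome check, the running counter and the add-both-orientations set bookkeeping by a single set comprehension over the canonical representative min(code, code[::-1]) of each reversal class, returning the set's size.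
import Mathlib
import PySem

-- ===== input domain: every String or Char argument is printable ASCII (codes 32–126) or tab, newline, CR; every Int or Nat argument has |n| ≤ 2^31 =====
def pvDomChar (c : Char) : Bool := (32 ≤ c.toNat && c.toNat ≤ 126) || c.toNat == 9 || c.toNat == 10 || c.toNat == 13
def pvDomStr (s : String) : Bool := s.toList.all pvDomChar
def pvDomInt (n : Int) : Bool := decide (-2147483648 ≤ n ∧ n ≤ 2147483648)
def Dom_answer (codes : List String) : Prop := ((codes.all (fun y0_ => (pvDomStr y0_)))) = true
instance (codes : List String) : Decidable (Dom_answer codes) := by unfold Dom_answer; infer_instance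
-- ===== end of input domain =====

-- B drops A's palindrome helper, running counter and add-both-orientations set logic,
-- keeping only a set of canonical representatives min(code, code[::-1]); objective: simpler.

-- ===== PORT A =====
-- code[::-1]; step -1 ≠ 0, so slice? is always `some` and getD "" is never reached
def pyRev (s : String) : String := (PySem.Str.slice? s none none (-1)).getD ""

def is_palindrome (code : String) : Bool :=
  if code == pyRev code then true else false

def answer (codes : List String) : Int :=
  (codes.foldl (fun (acc : PySem.Set String × Int) code =>
      if PySem.Set.contains acc.1 code then acc
      else if is_palindrome code then (PySem.Set.add acc.1 code, acc.2 + 1)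
      else (PySem.Set.add (PySem.Set.add acc.1 code) (pyRev code), acc.2 + 1))
    (PySem.Set.empty, 0)).2

-- ===== PORT B =====
-- min(code, code[::-1]) under Python's lexicographic string order (= lex order on the char lists)
def canon (code : String) : List Char := min code.toList code.toList.reverse

def answer_alt (codes : List String) : Int :=
  ((PySem.Set.ofList (codes.map canon)).length : Int)

-- ===== PRECONDITION & SPEC =====
def Spec_answer (codes : List String) (out : Int) : Prop := out = answer_alt codes
instance (codes : List String) (out : Int) : Decidable (Spec_answer codes out) := by unfold Spec_answer; infer_instance

-- ===== CLAIM (what is proved, stated in full; the proofs are below) =====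
def Claim_equal_answer : Prop := ∀ (codes : List String), Dom_answer codes → Spec_answer codes (answer codes)

-- ===== LEMMAS AND PROOFS =====

theorem pyRev_eq (s : String) : pyRev s = String.ofList s.toList.reverse := by
  simp [pyRev, PySem.Str.slice?_none_none_neg_one]

theorem toList_pyRev (s : String) : (pyRev s).toList = s.toList.reverse := by
  simp [pyRev_eq]

theorem canon_eq_canon_iff (a b : String) :
    canon a = canon b ↔ a.toList = b.toList ∨ a.toList = b.toList.reverse := by
  constructor
  · intro h
    have ha : a.toList = canon a ∨ a.toList = (canon a).reverse := by
      rcases min_choice a.toList a.toList.reverse with h' | h'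
      · exact Or.inl h'.symm
      · right; simp [canon, h']
    have hb : b.toList = canon b ∨ b.toList = (canon b).reverse := by
      rcases min_choice b.toList b.toList.reverse with h' | h'
      · exact Or.inl h'.symm
      · right; simp [canon, h']
    rw [h] at ha
    rcases ha with ha | ha <;> rcases hb with hb | hb <;>
      simp [ha, hb]
  · intro h
    rcases h with h | h
    · simp [canon, h]
    · simp [canon, h, min_comm]

theorem string_eq_iff_toList (a b : String) : a = b ↔ a.toList = b.toList := by
  constructor
  · intro h; rw [h]
  · intro h
    have := congrArg String.ofList h; simpa using this

-- the step invariant: x ∈ s ↔ canon x ∈ t, and the counter equals t's size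
theorem answer_loop (codes : List String) (s : PySem.Set String)
    (t : PySem.Set (List Char)) (n : Int)
    (hs : s.Nodup) (ht : t.Nodup)
    (hinv : ∀ x : String, x ∈ s ↔ canon x ∈ t)
    (hn : n = (t.length : Int)) :
    (codes.foldl (fun (acc : PySem.Set String × Int) code =>
      if PySem.Set.contains acc.1 code then acc
      else if is_palindrome code then (PySem.Set.add acc.1 code, acc.2 + 1)
      else (PySem.Set.add (PySem.Set.add acc.1 code) (pyRev code), acc.2 + 1))
      (s, n)).2
    = (((codes.map canon).foldl PySem.Set.add t).length : Int) := by
  induction codes generalizing s t n with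
  | nil => simpa using hn
  | cons code rest ih =>
    simp only [List.foldl_cons, List.map_cons]
    by_cases hc : code ∈ s
    · have hct : canon code ∈ t := (hinv code).mp hc
      rw [if_pos (by simpa [PySem.Set.contains_iff] using hc),
          PySem.Set.add_of_mem hct]
      exact ih s t n hs ht hinv hn
    · have hct : canon code ∉ t := fun h => hc ((hinv code).mpr h)
      rw [if_neg (by simpa [PySem.Set.contains_iff] using hc),
          PySem.Set.add_of_not_mem hct]
      have htn : (t ++ [canon code]).Nodup := by
        have h := PySem.Set.nodup_add t (canon code) ht
        rwa [PySem.Set.add_of_not_mem hct] at h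
      have hlen : (n + 1) = (((t ++ [canon code]).length : Nat) : Int) := by
        simp [hn]
      by_cases hp : is_palindrome code = true
      · have hpal : code.toList.reverse = code.toList := by
          have h2 : code = pyRev code := by
            by_cases h : code = pyRev code
            · exact h
            · simp [is_palindrome, h] at hp
          have := congrArg String.toList h2
          rw [toList_pyRev] at this
          exact this.symm
        rw [if_pos hp]
        refine ih _ _ _ (PySem.Set.nodup_add _ _ hs) htn ?_ hlen
        intro x
        rw [PySem.Set.mem_add, List.mem_append]
        constructor
        · rintro (hx | rfl)
          · exact Or.inl ((hinv x).mp hx)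
          · simp
        · rintro (hx | hx)
          · exact Or.inl ((hinv x).mpr hx)
          · right
            have := (canon_eq_canon_iff x code).mp (by simpa using hx)
            rcases this with h | h
            · exact (string_eq_iff_toList _ _).mpr h
            · exact (string_eq_iff_toList _ _).mpr (by rw [h, hpal])

      · have hnp : code.toList.reverse ≠ code.toList := by
          intro hEq
          apply hp
          simp [is_palindrome, string_eq_iff_toList, toList_pyRev, hEq]
        rw [if_neg hp]
        refine ih _ _ _ (PySem.Set.nodup_add _ _ (PySem.Set.nodup_add _ _ hs)) htn ?_ hlen
        intro x
        rw [PySem.Set.mem_add, PySem.Set.mem_add, List.mem_append]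
        constructor
        · rintro ((hx | rfl) | rfl)
          · exact Or.inl ((hinv x).mp hx)
          · simp
          · right
            simp only [List.mem_singleton]
            rw [canon_eq_canon_iff]
            right; exact toList_pyRev code
        · rintro (hx | hx)
          · exact Or.inl (Or.inl ((hinv x).mpr hx))
          · have := (canon_eq_canon_iff x code).mp (by simpa using hx)
            rcases this with h | h
            · exact Or.inl (Or.inr ((string_eq_iff_toList _ _).mpr h))
            · right
              rw [string_eq_iff_toList, toList_pyRev]
              exact h

-- ===== VERDICT (by name: the statement is the Claim_ definition above) =====
theorem answer_spec : Claim_equal_answer := by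
  intro codes _
  show answer codes = answer_alt codes
  unfold answer answer_alt
  rw [PySem.Set.ofList_eq_foldl]
  exact answer_loop codes [] [] 0 List.nodup_nil List.nodup_nil (by simp) rfl
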